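-- pv_equiv track=rewrite | github.com/bittarwork/chessAttackCalculater | chess.py | calculate_attacked_squares
-- ===== SOURCE A (Python) =====
-- def mark_rook_attacks(board):
--     """
--     Marks squares attacked by rooks on the board.
--
--     Parameters:
--     board (list): A 2D list representing the chess board.
--
--     Returns:
--     list: A 2D list with attacked squares marked as -1.
--     """
--     size = len(board)
--     threat_map = [[0] * size for _ in range(size)]
--     for i in range(size):
--         for j in range(size):
--             if board[i][j] == 'R':
--                 for k in range(size):
--                     threat_map[i][k] = -1
--                     threat_map[k][j] = -1
--     return threat_map
--
-- def mark_bishop_attacks(board):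
--     """
--     Marks squares attacked by bishops on the board.
--
--     Parameters:
--     board (list): A 2D list representing the chess board.
--
--     Returns:
--     list: A 2D list with attacked squares marked as -1.
--     """
--     size = len(board)
--     threat_map = [[0] * size for _ in range(size)]
--     for i in range(size):
--         for j in range(size):
--             if board[i][j] == 'B':
--                 for d in range(1, size):
--                     if i - d >= 0 and j - d >= 0:
--                         threat_map[i - d][j - d] = -1
--                     if i + d < size and j + d < size:
--                         threat_map[i + d][j + d] = -1
--                     if i - d >= 0 and j + d < size:
--                         threat_map[i - d][j + d] = -1
--                     if i + d < size and j - d >= 0: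
--                         threat_map[i + d][j - d] = -1
--     return threat_map
--
-- def mark_queen_attacks(board):
--     """
--     Marks squares attacked by queens on the board.
--
--     Parameters:
--     board (list): A 2D list representing the chess board.
--
--     Returns:
--     list: A 2D list with attacked squares marked as -1.
--     """
--     size = len(board)
--     threat_map = [[0] * size for _ in range(size)]
--     for i in range(size):
--         for j in range(size):
--             if board[i][j] == 'Q':
--                 for k in range(size):
--                     threat_map[i][k] = -1
--                     threat_map[k][j] = -1
--                 for d in range(1, size):
--                     if i - d >= 0 and j - d >= 0:
--                         threat_map[i - d][j - d] = -1
--                     if i + d < size and j + d < size: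
--                         threat_map[i + d][j + d] = -1
--                     if i - d >= 0 and j + d < size:
--                         threat_map[i - d][j + d] = -1
--                     if i + d < size and j - d >= 0:
--                         threat_map[i + d][j - d] = -1
--     return threat_map
--
-- def calculate_attacked_squares(board):
--     """
--     Calculates the number of squares attacked by all pieces on the board.
--
--     Parameters:
--     board (list): A 2D list representing the chess board.
--
--     Returns:
--     int: The number of squares under attack.
--     """
--     rook_threats = mark_rook_attacks(board)
--     bishop_threats = mark_bishop_attacks(board)
--     queen_threats = mark_queen_attacks(board)
--     size = len(board)
--     total_threats = [[0] * size for _ in range(size)]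
--     for i in range(size):
--         for j in range(size):
--             if rook_threats[i][j] == -1 or bishop_threats[i][j] == -1 or queen_threats[i][j] == -1:
--                 total_threats[i][j] = -1
--     return sum(row.count(-1) for row in total_threats)
-- ===== SOURCE B (Python) =====
-- def calculate_attacked_squares(board):
--     n = len(board)
--     row_att = [False] * n
--     col_att = [False] * n
--     sum_cnt = [0] * (2 * n)   # diagonal i + j
--     diff_cnt = [0] * (2 * n)  # anti-diagonal, index n + i - j
--     for i in range(n):
--         for j in range(n):
--             p = board[i][j]
--             if p == 'R' or p == 'Q':
--                 row_att[i] = True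
--                 col_att[j] = True
--             if p == 'B' or p == 'Q':
--                 sum_cnt[i + j] += 1
--                 diff_cnt[n + i - j] += 1
--     total = 0
--     for i in range(n):
--         for j in range(n):
--             p = board[i][j]
--             self_diag = 1 if (p == 'B' or p == 'Q') else 0
--             if (row_att[i] or col_att[j]
--                     or sum_cnt[i + j] > self_diag
--                     or diff_cnt[n + i - j] > self_diag):
--                 total += 1
--     return total
-- ===== Notes on version B (the rewrite author's own statement) =====
-- stated objective: alternative
-- what changed: Instead of building three n-by-n threat maps by re-sweeping row/column/diagonal squares for every piece and then merging them, B makes one pass recording attacked-row/column flags and per-diagonal bishop/queen counts, then counts attacked squares in a second pass with a self-square correction; this removes the per-piece O(n) marking sweeps (which only pay off on piece-dense boards).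
import Mathlib
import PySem

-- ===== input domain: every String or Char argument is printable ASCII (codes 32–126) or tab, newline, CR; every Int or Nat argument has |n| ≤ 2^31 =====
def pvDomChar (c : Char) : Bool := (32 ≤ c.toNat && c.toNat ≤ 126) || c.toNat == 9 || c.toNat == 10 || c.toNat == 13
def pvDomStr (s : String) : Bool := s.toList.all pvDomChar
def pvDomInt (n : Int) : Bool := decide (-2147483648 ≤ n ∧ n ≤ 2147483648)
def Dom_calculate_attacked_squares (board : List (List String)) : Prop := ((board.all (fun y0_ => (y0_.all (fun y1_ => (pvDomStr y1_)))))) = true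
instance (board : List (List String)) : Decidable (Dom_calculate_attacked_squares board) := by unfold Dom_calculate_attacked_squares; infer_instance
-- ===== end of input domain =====

-- ===== PORT A =====
-- B precomputes per-row/column rook-or-queen flags and per-diagonal bishop-or-queen counts,
-- replacing A's per-piece board sweeps: one counting pass instead of marking threat maps.
-- A-side helpers: pvCell = board[i][j] (exact for in-range indices, which Pre_ guarantees);
-- pvMSet m i j = "m[i][j] = -1" (indices produced by A's loops are always in range).
def pvCell (board : List (List String)) (i j : Nat) : String :=
  (board.getD i []).getD j ""

def pvMSet (m : List (List Int)) (i j : Nat) : List (List Int) :=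
  m.set i ((m.getD i []).set j (-1))

def mark_rook_attacks (board : List (List String)) : List (List Int) :=
  let size := board.length
  (List.range size).foldl
    (fun tm i => (List.range size).foldl
      (fun tm j =>
        if pvCell board i j = "R" then
          (List.range size).foldl (fun tm k => pvMSet (pvMSet tm i k) k j) tm
        else tm) tm)
    (List.replicate size (List.replicate size (0 : Int)))

-- the body of A's `for d in range(1, size)` loop (four guarded writes, in A's order)
def pvDiagStep (size i j : Nat) (tm : List (List Int)) (d : Nat) : List (List Int) :=
  let t1 := if d ≤ i ∧ d ≤ j then pvMSet tm (i - d) (j - d) else tm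
  let t2 := if i + d < size ∧ j + d < size then pvMSet t1 (i + d) (j + d) else t1
  let t3 := if d ≤ i ∧ j + d < size then pvMSet t2 (i - d) (j + d) else t2
  if i + d < size ∧ d ≤ j then pvMSet t3 (i + d) (j - d) else t3

def mark_bishop_attacks (board : List (List String)) : List (List Int) :=
  let size := board.length
  (List.range size).foldl
    (fun tm i => (List.range size).foldl
      (fun tm j =>
        if pvCell board i j = "B" then
          (List.range' 1 (size - 1)).foldl (pvDiagStep size i j) tm
        else tm) tm)
    (List.replicate size (List.replicate size (0 : Int)))

def mark_queen_attacks (board : List (List String)) : List (List Int) :=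
  let size := board.length
  (List.range size).foldl
    (fun tm i => (List.range size).foldl
      (fun tm j =>
        if pvCell board i j = "Q" then
          (List.range' 1 (size - 1)).foldl (pvDiagStep size i j)
            ((List.range size).foldl (fun tm k => pvMSet (pvMSet tm i k) k j) tm)
        else tm) tm)
    (List.replicate size (List.replicate size (0 : Int)))

def calculate_attacked_squares (board : List (List String)) : Int :=
  let rook_threats := mark_rook_attacks board
  let bishop_threats := mark_bishop_attacks board
  let queen_threats := mark_queen_attacks board
  let size := board.length
  let total_threats := (List.range size).foldl
    (fun tm i => (List.range size).foldl
      (fun tm j =>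
        if (rook_threats.getD i []).getD j 0 = -1 ∨
           (bishop_threats.getD i []).getD j 0 = -1 ∨
           (queen_threats.getD i []).getD j 0 = -1 then
          pvMSet tm i j
        else tm) tm)
    (List.replicate size (List.replicate size (0 : Int)))
  (total_threats.map (fun row => ((row.count (-1) : Nat) : Int))).sum

-- ===== PORT B =====
-- the four accumulator lists of Source B's first pass
structure PVState where
  rowAtt : List Bool
  colAtt : List Bool
  sumCnt : List Int
  diffCnt : List Int

def calculate_attacked_squares_alt (board : List (List String)) : Int :=
  let n := board.length
  let st := (List.range n).foldl
    (fun st i => (List.range n).foldl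
      (fun (st : PVState) j =>
        let p := pvCell board i j
        let st := if p = "R" ∨ p = "Q" then
            { st with rowAtt := st.rowAtt.set i true, colAtt := st.colAtt.set j true }
          else st
        if p = "B" ∨ p = "Q" then
          { st with sumCnt := st.sumCnt.set (i + j) (st.sumCnt.getD (i + j) 0 + 1),
                    diffCnt := st.diffCnt.set (n + i - j) (st.diffCnt.getD (n + i - j) 0 + 1) }
        else st) st)
    ⟨List.replicate n false, List.replicate n false,
     List.replicate (2 * n) (0 : Int), List.replicate (2 * n) (0 : Int)⟩
  (List.range n).foldl
    (fun total i => (List.range n).foldl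
      (fun (total : Int) j =>
        let p := pvCell board i j
        let selfd : Int := if p = "B" ∨ p = "Q" then 1 else 0
        if st.rowAtt.getD i false || st.colAtt.getD j false
            || decide (selfd < st.sumCnt.getD (i + j) 0)
            || decide (selfd < st.diffCnt.getD (n + i - j) 0) then
          total + 1
        else total) total)
    (0 : Int)

-- ===== PRECONDITION & SPEC =====
-- Pre_ excludes exactly the ragged boards: A reads board[i][j] for all i, j < len(board),
-- so a row shorter than the board raises IndexError in Python (B reads the same cells).
def Pre_calculate_attacked_squares (board : List (List String)) : Prop :=
  ∀ row ∈ board, board.length ≤ row.length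

instance (board : List (List String)) : Decidable (Pre_calculate_attacked_squares board) := by
  unfold Pre_calculate_attacked_squares; infer_instance

def pvWitness_calculate_attacked_squares : List (List String) :=
  [["R", "."], [".", "B"]]

def Spec_calculate_attacked_squares (board : List (List String)) (out : Int) : Prop := out = calculate_attacked_squares_alt board
instance (board : List (List String)) (out : Int) : Decidable (Spec_calculate_attacked_squares board out) := by unfold Spec_calculate_attacked_squares; infer_instance

-- ===== CLAIM (what is proved, stated in full; the proofs are below) =====
def Claim_equal_calculate_attacked_squares : Prop := ∀ (board : List (List String)), Dom_calculate_attacked_squares board → Pre_calculate_attacked_squares board → Spec_calculate_attacked_squares board (calculate_attacked_squares board)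

-- ===== LEMMAS AND PROOFS =====

def pvShape (n : Nat) (m : List (List Int)) : Prop :=
  m.length = n ∧ ∀ row ∈ m, row.length = n

def pvGet (m : List (List Int)) (r c : Nat) : Int :=
  (m.getD r []).getD c 0

lemma pvGet_replicate (n r c : Nat) :
    pvGet (List.replicate n (List.replicate n (0 : Int))) r c = 0 := by
  simp [pvGet, List.getD, List.getElem?_replicate]
  split <;> simp [List.getD, List.getElem?_replicate] <;> split <;> simp

lemma pvShape_replicate (n : Nat) :
    pvShape n (List.replicate n (List.replicate n (0 : Int))) := by
  refine ⟨by simp, ?_⟩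
  intro row hrow
  simp [List.eq_of_mem_replicate hrow]

lemma pvShape_mset {n : Nat} {m : List (List Int)} (hm : pvShape n m) (i j : Nat) :
    pvShape n (pvMSet m i j) := by
  obtain ⟨hlen, hrows⟩ := hm
  by_cases hi : i < m.length
  · refine ⟨by simp [pvMSet, hlen], ?_⟩
    intro row hrow
    rcases List.mem_or_eq_of_mem_set hrow with h | h
    · exact hrows _ h
    · subst h
      rw [List.length_set, List.getD_eq_getElem _ _ hi]
      exact hrows _ (List.getElem_mem hi)
  · rw [pvMSet, List.set_eq_of_length_le (by omega)]
    exact ⟨hlen, hrows⟩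

lemma pvGetD_set {α : Type} (l : List α) (i j : Nat) (v d : α) (hj : j < l.length) :
    (l.set i v).getD j d = if i = j then v else l.getD j d := by
  rw [List.getD_eq_getElem _ _ (by simpa using hj), List.getElem_set]
  split
  · rfl
  · exact (List.getD_eq_getElem _ _ hj).symm

lemma pvGet_mset {n : Nat} {m : List (List Int)} (hm : pvShape n m)
    {i j r c : Nat} (hi : i < n) (hj : j < n) (hr : r < n) (hc : c < n) :
    pvGet (pvMSet m i j) r c = if r = i ∧ c = j then -1 else pvGet m r c := by
  obtain ⟨hlen, hrows⟩ := hm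
  have hrowlen : (m.getD i []).length = n := by
    rw [List.getD_eq_getElem _ _ (by omega)]
    exact hrows _ (List.getElem_mem (by omega))
  unfold pvGet pvMSet
  rw [pvGetD_set _ _ _ _ _ (by omega)]
  by_cases hri : i = r
  · subst hri
    rw [if_pos rfl, pvGetD_set _ _ _ _ _ (by omega)]
    by_cases hcj : j = c
    · simp [hcj]
    · rw [if_neg hcj, if_neg (by tauto)]
  · rw [if_neg hri, if_neg (by tauto)]

lemma pvShape_foldl {n : Nat} {α : Type} {L : List α}
    {f : List (List Int) → α → List (List Int)}
    (hf : ∀ m x, x ∈ L → pvShape n m → pvShape n (f m x))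
    {m : List (List Int)} (hm : pvShape n m) :
    pvShape n (L.foldl f m) := by
  induction L generalizing m with
  | nil => exact hm
  | cons x L ih =>
    exact ih (fun m y hy => hf m y (List.mem_cons_of_mem _ hy))
      (hf m x List.mem_cons_self hm)

lemma pvGet_foldl_mark {n : Nat} {α : Type} {L : List α}
    {f : List (List Int) → α → List (List Int)} {Q : α → Nat → Nat → Prop}
    {r c : Nat} (hr : r < n) (hc : c < n)
    (hfs : ∀ m x, x ∈ L → pvShape n m → pvShape n (f m x))
    (hf : ∀ m x, x ∈ L → pvShape n m →
      (pvGet (f m x) r c = -1 ↔ pvGet m r c = -1 ∨ Q x r c))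
    {m : List (List Int)} (hm : pvShape n m) :
    (pvGet (L.foldl f m) r c = -1 ↔ pvGet m r c = -1 ∨ ∃ x ∈ L, Q x r c) := by
  induction L generalizing m with
  | nil => simp
  | cons x L ih =>
    rw [List.foldl_cons,
      ih (fun m y hy => hfs m y (List.mem_cons_of_mem _ hy))
         (fun m y hy => hf m y (List.mem_cons_of_mem _ hy))
         (hfs m x List.mem_cons_self hm),
      hf m x List.mem_cons_self hm]
    constructor
    · rintro ((h | h) | ⟨y, hy, h⟩)
      · exact Or.inl h
      · exact Or.inr ⟨x, List.mem_cons_self, h⟩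
      · exact Or.inr ⟨y, List.mem_cons_of_mem _ hy, h⟩
    · rintro (h | ⟨y, hy, h⟩)
      · exact Or.inl (Or.inl h)
      · rcases List.mem_cons.mp hy with rfl | hy
        · exact Or.inl (Or.inr h)
        · exact Or.inr ⟨y, hy, h⟩

lemma pvGet_ifset {n : Nat} {m : List (List Int)} (hm : pvShape n m)
    {cond : Prop} [Decidable cond] {i j r c : Nat}
    (hij : cond → i < n ∧ j < n) (hr : r < n) (hc : c < n) :
    (pvGet (if cond then pvMSet m i j else m) r c = -1 ↔
      pvGet m r c = -1 ∨ (cond ∧ r = i ∧ c = j)) := by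
  by_cases h : cond
  · rw [if_pos h, pvGet_mset hm (hij h).1 (hij h).2 hr hc]
    split
    · simp_all
    · simp_all
  · simp [h]

lemma pvShape_ifset {n : Nat} {m : List (List Int)} (hm : pvShape n m)
    {cond : Prop} [Decidable cond] {i j : Nat} :
    pvShape n (if cond then pvMSet m i j else m) := by
  split
  · exact pvShape_mset hm i j
  · exact hm

lemma pvShape_rookloop {n : Nat} {m : List (List Int)} (hm : pvShape n m) {i j : Nat} :
    pvShape n ((List.range n).foldl (fun tm k => pvMSet (pvMSet tm i k) k j) m) := by
  exact pvShape_foldl (fun m x _ h => pvShape_mset (pvShape_mset h i x) x j) hm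

lemma pvGet_rookloop {n : Nat} {m : List (List Int)} (hm : pvShape n m)
    {i j r c : Nat} (hi : i < n) (hj : j < n) (hr : r < n) (hc : c < n) :
    (pvGet ((List.range n).foldl (fun tm k => pvMSet (pvMSet tm i k) k j) m) r c = -1 ↔
      pvGet m r c = -1 ∨ r = i ∨ c = j) := by
  rw [pvGet_foldl_mark (Q := fun k r c => (r = i ∧ c = k) ∨ (r = k ∧ c = j)) hr hc
    (fun m x _ h => pvShape_mset (pvShape_mset h i x) x j)
    (fun m x hx h => by
      have hxn : x < n := List.mem_range.mp hx
      rw [pvGet_mset (pvShape_mset h i x) hxn hj hr hc, pvGet_mset h hi hxn hr hc]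
      split
      · simp_all
      · split
        · simp_all
        · simp_all) hm]
  constructor
  · rintro (h | ⟨k, _, (⟨rfl, rfl⟩ | ⟨rfl, rfl⟩)⟩)
    · exact Or.inl h
    · exact Or.inr (Or.inl rfl)
    · exact Or.inr (Or.inr rfl)
  · rintro (h | rfl | rfl)
    · exact Or.inl h
    · exact Or.inr ⟨c, List.mem_range.mpr hc, Or.inl ⟨rfl, rfl⟩⟩
    · exact Or.inr ⟨r, List.mem_range.mpr hr, Or.inr ⟨rfl, rfl⟩⟩

lemma pvShape_diagstep {n : Nat} {m : List (List Int)} (hm : pvShape n m) {i j d : Nat} :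
    pvShape n (pvDiagStep n i j m d) := by
  unfold pvDiagStep
  exact pvShape_ifset (pvShape_ifset (pvShape_ifset (pvShape_ifset hm)))

lemma pvGet_diagstep {n : Nat} {m : List (List Int)} (hm : pvShape n m)
    {i j r c : Nat} (hi : i < n) (hj : j < n) (hr : r < n) (hc : c < n) (d : Nat) :
    (pvGet (pvDiagStep n i j m d) r c = -1 ↔
      pvGet m r c = -1 ∨
      ((d ≤ i ∧ d ≤ j ∧ r = i - d ∧ c = j - d) ∨
       (i + d < n ∧ j + d < n ∧ r = i + d ∧ c = j + d) ∨
       (d ≤ i ∧ j + d < n ∧ r = i - d ∧ c = j + d) ∨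
       (i + d < n ∧ d ≤ j ∧ r = i + d ∧ c = j - d))) := by
  unfold pvDiagStep
  rw [pvGet_ifset (pvShape_ifset (pvShape_ifset (pvShape_ifset hm)))
        (fun h => ⟨h.1, by omega⟩) hr hc,
      pvGet_ifset (pvShape_ifset (pvShape_ifset hm)) (fun h => ⟨by omega, h.2⟩) hr hc,
      pvGet_ifset (pvShape_ifset hm) (fun h => h) hr hc,
      pvGet_ifset hm (fun h => ⟨by omega, by omega⟩) hr hc]
  tauto

lemma pvShape_diagloop {n : Nat} {m : List (List Int)} (hm : pvShape n m) {i j : Nat} :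
    pvShape n ((List.range' 1 (n - 1)).foldl (pvDiagStep n i j) m) := by
  exact pvShape_foldl (fun m x _ h => pvShape_diagstep h) hm

lemma pvGet_diagloop {n : Nat} {m : List (List Int)} (hm : pvShape n m)
    {i j r c : Nat} (hi : i < n) (hj : j < n) (hr : r < n) (hc : c < n) :
    (pvGet ((List.range' 1 (n - 1)).foldl (pvDiagStep n i j) m) r c = -1 ↔
      pvGet m r c = -1 ∨ ((i + j = r + c ∨ i + c = r + j) ∧ ¬(i = r ∧ j = c))) := by
  rw [pvGet_foldl_mark (Q := fun d r c =>
      (d ≤ i ∧ d ≤ j ∧ r = i - d ∧ c = j - d) ∨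
      (i + d < n ∧ j + d < n ∧ r = i + d ∧ c = j + d) ∨
      (d ≤ i ∧ j + d < n ∧ r = i - d ∧ c = j + d) ∨
      (i + d < n ∧ d ≤ j ∧ r = i + d ∧ c = j - d)) hr hc
    (fun m x _ h => pvShape_diagstep h)
    (fun m x _ h => pvGet_diagstep h hi hj hr hc x) hm]
  refine or_congr_right ?_
  constructor
  · rintro ⟨d, hd, h⟩
    have hd' : 1 ≤ d ∧ d < 1 + (n - 1) := List.mem_range'_1.mp hd
    rcases h with ⟨_,_,rfl,rfl⟩ | ⟨_,_,rfl,rfl⟩ | ⟨_,_,rfl,rfl⟩ | ⟨_,_,rfl,rfl⟩ <;>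
      constructor <;> first | omega | (rintro ⟨h1, h2⟩; omega)
  · rintro ⟨hrel | hrel, hne⟩
    · rcases Nat.lt_trichotomy i r with h | h | h
      · exact ⟨r - i, List.mem_range'_1.mpr (by omega), Or.inr (Or.inr (Or.inr ⟨by omega, by omega, by omega, by omega⟩))⟩
      · exact absurd ⟨h, by omega⟩ hne
      · exact ⟨i - r, List.mem_range'_1.mpr (by omega), Or.inr (Or.inr (Or.inl ⟨by omega, by omega, by omega, by omega⟩))⟩
    · rcases Nat.lt_trichotomy i r with h | h | h
      · exact ⟨r - i, List.mem_range'_1.mpr (by omega), Or.inr (Or.inl ⟨by omega, by omega, by omega, by omega⟩)⟩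
      · exact absurd ⟨h, by omega⟩ hne
      · exact ⟨i - r, List.mem_range'_1.mpr (by omega), Or.inl ⟨by omega, by omega, by omega, by omega⟩⟩

def pvStraight (board : List (List String)) (pc : String) (r c : Nat) : Prop :=
  ∃ a < board.length, ∃ b < board.length, pvCell board a b = pc ∧ (r = a ∨ c = b)

def pvDiagP (board : List (List String)) (pc : String) (r c : Nat) : Prop :=
  ∃ a < board.length, ∃ b < board.length,
    pvCell board a b = pc ∧ (a + b = r + c ∨ a + c = r + b) ∧ ¬(a = r ∧ b = c)

lemma pvGet_mark_rook {board : List (List String)} {r c : Nat}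
    (hr : r < board.length) (hc : c < board.length) :
    (pvGet (mark_rook_attacks board) r c = -1 ↔ pvStraight board "R" r c) := by
  set n := board.length with hn
  have hdef : mark_rook_attacks board = (List.range n).foldl
      (fun tm i => (List.range n).foldl
        (fun tm j =>
          if pvCell board i j = "R" then
            (List.range n).foldl (fun tm k => pvMSet (pvMSet tm i k) k j) tm
          else tm) tm)
      (List.replicate n (List.replicate n (0 : Int))) := rfl
  rw [hdef, pvGet_foldl_mark (Q := fun i r c =>
        ∃ j ∈ List.range n, pvCell board i j = "R" ∧ (r = i ∨ c = j)) hr hc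
    (fun m x _ h => pvShape_foldl (fun m' y _ h' => by
        split
        · exact pvShape_rookloop h'
        · exact h') h)
    (fun m i hi h => by
      have hin : i < n := List.mem_range.mp hi
      rw [pvGet_foldl_mark (Q := fun j r c => pvCell board i j = "R" ∧ (r = i ∨ c = j)) hr hc
        (fun m' y _ h' => by
          split
          · exact pvShape_rookloop h'
          · exact h')
        (fun m j hj h' => by
          have hjn : j < n := List.mem_range.mp hj
          by_cases hR : pvCell board i j = "R"
          · rw [if_pos hR, pvGet_rookloop h' hin hjn hr hc]
            tauto
          · rw [if_neg hR]
            tauto) h]) (pvShape_replicate n)]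
  rw [pvGet_replicate]
  simp only [List.mem_range]
  constructor
  · rintro ((h : (0:Int) = -1) | ⟨a, ha, b, hb, hcell, hor⟩)
    · exact absurd h (by decide)
    · exact ⟨a, ha, b, hb, hcell, hor⟩
  · rintro ⟨a, ha, b, hb, hcell, hor⟩
    exact Or.inr ⟨a, ha, b, hb, hcell, hor⟩

lemma pvGet_mark_bishop {board : List (List String)} {r c : Nat}
    (hr : r < board.length) (hc : c < board.length) :
    (pvGet (mark_bishop_attacks board) r c = -1 ↔ pvDiagP board "B" r c) := by
  set n := board.length with hn
  have hdef : mark_bishop_attacks board = (List.range n).foldl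
      (fun tm i => (List.range n).foldl
        (fun tm j =>
          if pvCell board i j = "B" then
            (List.range' 1 (n - 1)).foldl (pvDiagStep n i j) tm
          else tm) tm)
      (List.replicate n (List.replicate n (0 : Int))) := rfl
  rw [hdef, pvGet_foldl_mark (Q := fun i r c =>
        ∃ j ∈ List.range n, pvCell board i j = "B" ∧
          ((i + j = r + c ∨ i + c = r + j) ∧ ¬(i = r ∧ j = c))) hr hc
    (fun m x _ h => pvShape_foldl (fun m' y _ h' => by
        split
        · exact pvShape_diagloop h'
        · exact h') h)
    (fun m i hi h => by
      have hin : i < n := List.mem_range.mp hi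
      rw [pvGet_foldl_mark (Q := fun j r c => pvCell board i j = "B" ∧
            ((i + j = r + c ∨ i + c = r + j) ∧ ¬(i = r ∧ j = c))) hr hc
        (fun m' y _ h' => by
          split
          · exact pvShape_diagloop h'
          · exact h')
        (fun m' j hj h' => by
          have hjn : j < n := List.mem_range.mp hj
          by_cases hB : pvCell board i j = "B"
          · rw [if_pos hB, pvGet_diagloop h' hin hjn hr hc]
            tauto
          · rw [if_neg hB]
            tauto) h]) (pvShape_replicate n)]
  rw [pvGet_replicate]
  simp only [List.mem_range]
  constructor
  · rintro ((h : (0:Int) = -1) | ⟨a, ha, b, hb, hcell, hrel⟩)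
    · exact absurd h (by decide)
    · exact ⟨a, ha, b, hb, hcell, hrel⟩
  · rintro ⟨a, ha, b, hb, hcell, hrel⟩
    exact Or.inr ⟨a, ha, b, hb, hcell, hrel⟩

lemma pvGet_mark_queen {board : List (List String)} {r c : Nat}
    (hr : r < board.length) (hc : c < board.length) :
    (pvGet (mark_queen_attacks board) r c = -1 ↔
      pvStraight board "Q" r c ∨ pvDiagP board "Q" r c) := by
  set n := board.length with hn
  have hdef : mark_queen_attacks board = (List.range n).foldl
      (fun tm i => (List.range n).foldl
        (fun tm j =>
          if pvCell board i j = "Q" then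
            (List.range' 1 (n - 1)).foldl (pvDiagStep n i j)
              ((List.range n).foldl (fun tm k => pvMSet (pvMSet tm i k) k j) tm)
          else tm) tm)
      (List.replicate n (List.replicate n (0 : Int))) := rfl
  rw [hdef, pvGet_foldl_mark (Q := fun i r c =>
        ∃ j ∈ List.range n, pvCell board i j = "Q" ∧
          ((r = i ∨ c = j) ∨ ((i + j = r + c ∨ i + c = r + j) ∧ ¬(i = r ∧ j = c)))) hr hc
    (fun m x _ h => pvShape_foldl (fun m' y _ h' => by
        split
        · exact pvShape_diagloop (pvShape_rookloop h')
        · exact h') h)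
    (fun m i hi h => by
      have hin : i < n := List.mem_range.mp hi
      rw [pvGet_foldl_mark (Q := fun j r c => pvCell board i j = "Q" ∧
            ((r = i ∨ c = j) ∨ ((i + j = r + c ∨ i + c = r + j) ∧ ¬(i = r ∧ j = c)))) hr hc
        (fun m' y _ h' => by
          split
          · exact pvShape_diagloop (pvShape_rookloop h')
          · exact h')
        (fun m' j hj h' => by
          have hjn : j < n := List.mem_range.mp hj
          by_cases hQ : pvCell board i j = "Q"
          · rw [if_pos hQ, pvGet_diagloop (pvShape_rookloop h') hin hjn hr hc,
              pvGet_rookloop h' hin hjn hr hc]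
            tauto
          · rw [if_neg hQ]
            tauto) h]) (pvShape_replicate n)]
  rw [pvGet_replicate]
  simp only [List.mem_range]
  constructor
  · rintro ((h : (0:Int) = -1) | ⟨a, ha, b, hb, hcell, hor | hrel⟩)
    · exact absurd h (by decide)
    · exact Or.inl ⟨a, ha, b, hb, hcell, hor⟩
    · exact Or.inr ⟨a, ha, b, hb, hcell, hrel⟩
  · rintro (⟨a, ha, b, hb, hcell, hor⟩ | ⟨a, ha, b, hb, hcell, hrel⟩)
    · exact Or.inr ⟨a, ha, b, hb, hcell, Or.inl hor⟩
    · exact Or.inr ⟨a, ha, b, hb, hcell, Or.inr hrel⟩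

def pvAttacked (board : List (List String)) (r c : Nat) : Prop :=
  pvStraight board "R" r c ∨ pvStraight board "Q" r c ∨
  pvDiagP board "B" r c ∨ pvDiagP board "Q" r c

def pvAttackedB (board : List (List String)) (q : Nat × Nat) : Bool :=
  decide (∃ a < board.length, ∃ b < board.length,
    (pvCell board a b = "R" ∨ pvCell board a b = "Q") ∧ (q.1 = a ∨ q.2 = b)) ||
  decide (∃ a < board.length, ∃ b < board.length,
    (pvCell board a b = "B" ∨ pvCell board a b = "Q") ∧
    (a + b = q.1 + q.2 ∨ a + q.2 = q.1 + b) ∧ ¬(a = q.1 ∧ b = q.2))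

lemma pvAttackedB_iff (board : List (List String)) (q : Nat × Nat) :
    pvAttackedB board q = true ↔ pvAttacked board q.1 q.2 := by
  simp only [pvAttackedB, pvAttacked, pvStraight, pvDiagP, Bool.or_eq_true, decide_eq_true_eq]
  constructor
  · rintro (⟨a, ha, b, hb, (h | h), hor⟩ | ⟨a, ha, b, hb, (h | h), hrel⟩)
    · exact Or.inl ⟨a, ha, b, hb, h, hor⟩
    · exact Or.inr (Or.inl ⟨a, ha, b, hb, h, hor⟩)
    · exact Or.inr (Or.inr (Or.inl ⟨a, ha, b, hb, h, hrel⟩))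
    · exact Or.inr (Or.inr (Or.inr ⟨a, ha, b, hb, h, hrel⟩))
  · rintro (⟨a, ha, b, hb, h, hor⟩ | ⟨a, ha, b, hb, h, hor⟩ |
      ⟨a, ha, b, hb, h, hrel⟩ | ⟨a, ha, b, hb, h, hrel⟩)
    · exact Or.inl ⟨a, ha, b, hb, Or.inl h, hor⟩
    · exact Or.inl ⟨a, ha, b, hb, Or.inr h, hor⟩
    · exact Or.inr ⟨a, ha, b, hb, Or.inl h, hrel⟩
    · exact Or.inr ⟨a, ha, b, hb, Or.inr h, hrel⟩

def pvPairs (n : Nat) : List (Nat × Nat) := List.range n ×ˢ List.range n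

lemma count_eq_countP_range (row : List Int) (a : Int) :
    row.count a = (List.range row.length).countP (fun c => row.getD c 0 == a) := by
  induction row with
  | nil => simp
  | cons h t ih =>
    rw [List.count_cons, List.length_cons, List.range_succ_eq_map, List.countP_cons,
      List.countP_map, ih]
    have h1 : List.countP ((fun c => ((h :: t).getD c 0 == a)) ∘ Nat.succ) (List.range t.length)
        = List.countP (fun c => t.getD c 0 == a) (List.range t.length) :=
      List.countP_congr (fun x _ => by simp [Function.comp])
    rw [h1]
    simp [Nat.add_comm]

lemma map_eq_map_range {α β : Type} (l : List α) (f : α → β) (d : α) :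
    l.map f = (List.range l.length).map (fun i => f (l.getD i d)) := by
  induction l with
  | nil => simp
  | cons h t ih =>
    rw [List.map_cons, List.length_cons, List.range_succ_eq_map, List.map_cons,
      List.map_map, ih]
    simp

lemma countP_product {α β : Type} (l1 : List α) (l2 : List β) (p : α × β → Bool) :
    (l1 ×ˢ l2).countP p = (l1.map (fun a => l2.countP (fun b => p (a, b)))).sum := by
  show ((l1.flatMap fun a => l2.map (Prod.mk a)).countP p) = _
  rw [List.countP_flatMap]
  congr 1
  refine List.map_congr_left (fun a _ => ?_)
  simp only [Function.comp_apply]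
  rw [List.countP_map]
  rfl

def pvTotal (board : List (List String)) : List (List Int) :=
  (List.range board.length).foldl
    (fun tm i => (List.range board.length).foldl
      (fun tm j =>
        if pvGet (mark_rook_attacks board) i j = -1 ∨
           pvGet (mark_bishop_attacks board) i j = -1 ∨
           pvGet (mark_queen_attacks board) i j = -1 then
          pvMSet tm i j
        else tm) tm)
    (List.replicate board.length (List.replicate board.length (0 : Int)))

lemma calcA_def (board : List (List String)) :
    calculate_attacked_squares board =
      ((pvTotal board).map (fun row => ((row.count (-1) : Nat) : Int))).sum := rfl

lemma pvTotal_shape (board : List (List String)) : pvShape board.length (pvTotal board) :=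
  pvShape_foldl (fun m x _ h =>
    pvShape_foldl (fun m' y _ h' => pvShape_ifset h') h) (pvShape_replicate _)

lemma pvTotal_char (board : List (List String)) {r c : Nat}
    (hr : r < board.length) (hc : c < board.length) :
    (pvGet (pvTotal board) r c = -1 ↔ pvAttacked board r c) := by
  set n := board.length with hn
  set C : Nat → Nat → Prop := fun i j =>
    pvGet (mark_rook_attacks board) i j = -1 ∨
    pvGet (mark_bishop_attacks board) i j = -1 ∨
    pvGet (mark_queen_attacks board) i j = -1 with hC
  have hchar : pvGet (pvTotal board) r c = -1 ↔ C r c := by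
    rw [pvTotal, pvGet_foldl_mark (Q := fun i r c => ∃ j ∈ List.range n, C i j ∧ r = i ∧ c = j) hr hc
      (fun m x _ h => pvShape_foldl (fun m' y _ h' => pvShape_ifset h') h)
      (fun m i hi h => by
        have hin : i < n := List.mem_range.mp hi
        rw [pvGet_foldl_mark (Q := fun j r c => C i j ∧ r = i ∧ c = j) hr hc
          (fun m' y _ h' => pvShape_ifset h')
          (fun m' j hj h' => by
            have hjn : j < n := List.mem_range.mp hj
            exact pvGet_ifset h' (fun _ => ⟨hin, hjn⟩) hr hc) h]) (pvShape_replicate n),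
      pvGet_replicate]
    constructor
    · rintro ((h : (0:Int) = -1) | ⟨i, _, j, _, hCij, rfl, rfl⟩)
      · exact absurd h (by decide)
      · exact hCij
    · intro h
      exact Or.inr ⟨r, List.mem_range.mpr hr, c, List.mem_range.mpr hc, h, rfl, rfl⟩
  rw [hchar, hC]
  unfold pvAttacked
  dsimp only
  rw [pvGet_mark_rook hr hc, pvGet_mark_bishop hr hc, pvGet_mark_queen hr hc]
  tauto

lemma calcA_eq_countP (board : List (List String)) :
    calculate_attacked_squares board =
      (((pvPairs board.length).countP (pvAttackedB board) : Nat) : Int) := by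
  set n := board.length with hn
  obtain ⟨hTlen, hTrows⟩ := pvTotal_shape board
  rw [calcA_def, map_eq_map_range (pvTotal board) _ [], hTlen]
  have hrowfix : ∀ r ∈ List.range n,
      (((((pvTotal board).getD r []).count (-1) : Nat)) : Int) =
        (((List.range n).countP (fun c => pvAttackedB board (r, c)) : Nat) : Int) := by
    intro r hrn
    have hr : r < n := List.mem_range.mp hrn
    have hrow : ((pvTotal board).getD r []).length = n := by
      rw [List.getD_eq_getElem _ _ (by omega)]
      exact hTrows _ (List.getElem_mem (by omega))
    rw [count_eq_countP_range _ _, hrow]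
    norm_cast
    refine List.countP_congr (fun c hcn => ?_)
    have hc : c < n := List.mem_range.mp hcn
    have hh : ((pvTotal board).getD r []).getD c 0 = pvGet (pvTotal board) r c := rfl
    rw [hh]
    simp only [beq_iff_eq]
    rw [pvAttackedB_iff]
    exact pvTotal_char board hr hc
  rw [List.map_congr_left hrowfix, pvPairs, countP_product, Nat.cast_list_sum, List.map_map]
  refine congrArg List.sum ?_
  refine List.map_congr_left (fun a _ => ?_)
  rfl

def pvStShape (n : Nat) (st : PVState) : Prop :=
  st.rowAtt.length = n ∧ st.colAtt.length = n ∧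
  st.sumCnt.length = 2 * n ∧ st.diffCnt.length = 2 * n

def pvScanStep (board : List (List String)) (n : Nat) (st : PVState) (q : Nat × Nat) : PVState :=
  let p := pvCell board q.1 q.2
  let st := if p = "R" ∨ p = "Q" then
      { st with rowAtt := st.rowAtt.set q.1 true, colAtt := st.colAtt.set q.2 true }
    else st
  if p = "B" ∨ p = "Q" then
    { st with sumCnt := st.sumCnt.set (q.1 + q.2) (st.sumCnt.getD (q.1 + q.2) 0 + 1),
              diffCnt := st.diffCnt.set (n + q.1 - q.2) (st.diffCnt.getD (n + q.1 - q.2) 0 + 1) }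
  else st

lemma pvScanStep_rowAtt (board : List (List String)) (n : Nat) (st : PVState) (q : Nat × Nat) :
    (pvScanStep board n st q).rowAtt = if (pvCell board q.1 q.2 = "R" ∨ pvCell board q.1 q.2 = "Q") then st.rowAtt.set q.1 true else st.rowAtt := by
  simp only [pvScanStep]
  by_cases h2 : pvCell board q.1 q.2 = "B" ∨ pvCell board q.1 q.2 = "Q"
  · rw [if_pos h2]
    by_cases h1 : pvCell board q.1 q.2 = "R" ∨ pvCell board q.1 q.2 = "Q"
    · rw [if_pos h1, if_pos (show pvCell board q.1 q.2 = "R" ∨ pvCell board q.1 q.2 = "Q" from h1)]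
    · rw [if_neg h1, if_neg (show ¬(pvCell board q.1 q.2 = "R" ∨ pvCell board q.1 q.2 = "Q") from h1)]
  · rw [if_neg h2]
    by_cases h1 : pvCell board q.1 q.2 = "R" ∨ pvCell board q.1 q.2 = "Q"
    · rw [if_pos h1, if_pos (show pvCell board q.1 q.2 = "R" ∨ pvCell board q.1 q.2 = "Q" from h1)]
    · rw [if_neg h1, if_neg (show ¬(pvCell board q.1 q.2 = "R" ∨ pvCell board q.1 q.2 = "Q") from h1)]

lemma pvScanStep_colAtt (board : List (List String)) (n : Nat) (st : PVState) (q : Nat × Nat) :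
    (pvScanStep board n st q).colAtt = if (pvCell board q.1 q.2 = "R" ∨ pvCell board q.1 q.2 = "Q") then st.colAtt.set q.2 true else st.colAtt := by
  simp only [pvScanStep]
  by_cases h2 : pvCell board q.1 q.2 = "B" ∨ pvCell board q.1 q.2 = "Q"
  · rw [if_pos h2]
    by_cases h1 : pvCell board q.1 q.2 = "R" ∨ pvCell board q.1 q.2 = "Q"
    · rw [if_pos h1, if_pos (show pvCell board q.1 q.2 = "R" ∨ pvCell board q.1 q.2 = "Q" from h1)]
    · rw [if_neg h1, if_neg (show ¬(pvCell board q.1 q.2 = "R" ∨ pvCell board q.1 q.2 = "Q") from h1)]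
  · rw [if_neg h2]
    by_cases h1 : pvCell board q.1 q.2 = "R" ∨ pvCell board q.1 q.2 = "Q"
    · rw [if_pos h1, if_pos (show pvCell board q.1 q.2 = "R" ∨ pvCell board q.1 q.2 = "Q" from h1)]
    · rw [if_neg h1, if_neg (show ¬(pvCell board q.1 q.2 = "R" ∨ pvCell board q.1 q.2 = "Q") from h1)]

lemma pvScanStep_sumCnt (board : List (List String)) (n : Nat) (st : PVState) (q : Nat × Nat) :
    (pvScanStep board n st q).sumCnt = if (pvCell board q.1 q.2 = "B" ∨ pvCell board q.1 q.2 = "Q") then st.sumCnt.set (q.1 + q.2) (st.sumCnt.getD (q.1 + q.2) 0 + 1)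
      else st.sumCnt := by
  simp only [pvScanStep]
  by_cases h2 : pvCell board q.1 q.2 = "B" ∨ pvCell board q.1 q.2 = "Q"
  · rw [if_pos h2]
    by_cases h1 : pvCell board q.1 q.2 = "R" ∨ pvCell board q.1 q.2 = "Q"
    · rw [if_pos h1, if_pos (show pvCell board q.1 q.2 = "B" ∨ pvCell board q.1 q.2 = "Q" from h2)]
    · rw [if_neg h1, if_pos (show pvCell board q.1 q.2 = "B" ∨ pvCell board q.1 q.2 = "Q" from h2)]
  · rw [if_neg h2]
    by_cases h1 : pvCell board q.1 q.2 = "R" ∨ pvCell board q.1 q.2 = "Q"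
    · rw [if_pos h1, if_neg (show ¬(pvCell board q.1 q.2 = "B" ∨ pvCell board q.1 q.2 = "Q") from h2)]
    · rw [if_neg h1, if_neg (show ¬(pvCell board q.1 q.2 = "B" ∨ pvCell board q.1 q.2 = "Q") from h2)]

lemma pvScanStep_diffCnt (board : List (List String)) (n : Nat) (st : PVState) (q : Nat × Nat) :
    (pvScanStep board n st q).diffCnt = if (pvCell board q.1 q.2 = "B" ∨ pvCell board q.1 q.2 = "Q") then st.diffCnt.set (n + q.1 - q.2) (st.diffCnt.getD (n + q.1 - q.2) 0 + 1)
      else st.diffCnt := by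
  simp only [pvScanStep]
  by_cases h2 : pvCell board q.1 q.2 = "B" ∨ pvCell board q.1 q.2 = "Q"
  · rw [if_pos h2]
    by_cases h1 : pvCell board q.1 q.2 = "R" ∨ pvCell board q.1 q.2 = "Q"
    · rw [if_pos h1, if_pos (show pvCell board q.1 q.2 = "B" ∨ pvCell board q.1 q.2 = "Q" from h2)]
    · rw [if_neg h1, if_pos (show pvCell board q.1 q.2 = "B" ∨ pvCell board q.1 q.2 = "Q" from h2)]
  · rw [if_neg h2]
    by_cases h1 : pvCell board q.1 q.2 = "R" ∨ pvCell board q.1 q.2 = "Q"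
    · rw [if_pos h1, if_neg (show ¬(pvCell board q.1 q.2 = "B" ∨ pvCell board q.1 q.2 = "Q") from h2)]
    · rw [if_neg h1, if_neg (show ¬(pvCell board q.1 q.2 = "B" ∨ pvCell board q.1 q.2 = "Q") from h2)]

lemma foldl_foldl_product {α β γ : Type} (l1 : List α) (l2 : List β)
    (g : γ → α → β → γ) (s : γ) :
    l1.foldl (fun s a => l2.foldl (fun s b => g s a b) s) s =
      (l1 ×ˢ l2).foldl (fun s q => g s q.1 q.2) s := by
  induction l1 generalizing s with
  | nil => rfl
  | cons a l1 ih =>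
    rw [List.product_cons, List.foldl_cons, List.foldl_append, List.foldl_map, ih]

lemma pass1_inv (board : List (List String)) (n : Nat) (L : List (Nat × Nat))
    (hb : ∀ q ∈ L, q.1 < n ∧ q.2 < n) :
    ∀ st : PVState, pvStShape n st →
      pvStShape n (L.foldl (pvScanStep board n) st) ∧
      (∀ i < n, (L.foldl (pvScanStep board n) st).rowAtt.getD i false =
        (st.rowAtt.getD i false || L.any (fun q => decide (q.1 = i) && decide (pvCell board q.1 q.2 = "R" ∨ pvCell board q.1 q.2 = "Q")))) ∧
      (∀ j < n, (L.foldl (pvScanStep board n) st).colAtt.getD j false =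
        (st.colAtt.getD j false || L.any (fun q => decide (q.2 = j) && decide (pvCell board q.1 q.2 = "R" ∨ pvCell board q.1 q.2 = "Q")))) ∧
      (∀ s < 2 * n, (L.foldl (pvScanStep board n) st).sumCnt.getD s 0 =
        st.sumCnt.getD s 0 +
          (L.countP (fun q => decide (pvCell board q.1 q.2 = "B" ∨ pvCell board q.1 q.2 = "Q") && decide (q.1 + q.2 = s)) : Nat)) ∧
      (∀ s < 2 * n, (L.foldl (pvScanStep board n) st).diffCnt.getD s 0 =
        st.diffCnt.getD s 0 +
          (L.countP (fun q => decide (pvCell board q.1 q.2 = "B" ∨ pvCell board q.1 q.2 = "Q") && decide (n + q.1 - q.2 = s)) : Nat)) := by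
  induction L with
  | nil => intro st hst; simpa using hst
  | cons q L ih =>
    intro st hst
    obtain ⟨hq1, hq2⟩ := hb q List.mem_cons_self
    obtain ⟨hrl, hcl, hsl, hdl⟩ := hst
    have hst' : pvStShape n (pvScanStep board n st q) := by
      refine ⟨?_, ?_, ?_, ?_⟩
      · rw [pvScanStep_rowAtt]; split
        · simp [hrl]
        · exact hrl
      · rw [pvScanStep_colAtt]; split
        · simp [hcl]
        · exact hcl
      · rw [pvScanStep_sumCnt]; split
        · simp [hsl]
        · exact hsl
      · rw [pvScanStep_diffCnt]; split
        · simp [hdl]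
        · exact hdl
    obtain ⟨s1, s2, s3, s4, s5⟩ :=
      ih (fun p hp => hb p (List.mem_cons_of_mem _ hp)) (pvScanStep board n st q) hst'
    rw [List.foldl_cons]
    refine ⟨s1, ?_, ?_, ?_, ?_⟩
    · intro i hi
      rw [s2 i hi, pvScanStep_rowAtt, List.any_cons]
      have hgd : (if (pvCell board q.1 q.2 = "R" ∨ pvCell board q.1 q.2 = "Q") then st.rowAtt.set q.1 true else st.rowAtt).getD i false =
          (st.rowAtt.getD i false || (decide (q.1 = i) && decide (pvCell board q.1 q.2 = "R" ∨ pvCell board q.1 q.2 = "Q"))) := by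
        by_cases h : (pvCell board q.1 q.2 = "R" ∨ pvCell board q.1 q.2 = "Q")
        · rw [if_pos h, pvGetD_set _ _ _ _ _ (by omega)]
          by_cases hqi : q.1 = i
          · subst hqi; simp [h]
          · simp [hqi]
        · rw [if_neg h]; simp [h]
      rw [hgd, Bool.or_assoc]
    · intro j hj
      rw [s3 j hj, pvScanStep_colAtt, List.any_cons]
      have hgd : (if (pvCell board q.1 q.2 = "R" ∨ pvCell board q.1 q.2 = "Q") then st.colAtt.set q.2 true else st.colAtt).getD j false =
          (st.colAtt.getD j false || (decide (q.2 = j) && decide (pvCell board q.1 q.2 = "R" ∨ pvCell board q.1 q.2 = "Q"))) := by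
        by_cases h : (pvCell board q.1 q.2 = "R" ∨ pvCell board q.1 q.2 = "Q")
        · rw [if_pos h, pvGetD_set _ _ _ _ _ (by omega)]
          by_cases hqj : q.2 = j
          · subst hqj; simp [h]
          · simp [hqj]
        · rw [if_neg h]; simp [h]
      rw [hgd, Bool.or_assoc]
    · intro s hs
      rw [s4 s hs, pvScanStep_sumCnt, List.countP_cons]
      have hgd : (if (pvCell board q.1 q.2 = "B" ∨ pvCell board q.1 q.2 = "Q") then
            st.sumCnt.set (q.1 + q.2) (st.sumCnt.getD (q.1 + q.2) 0 + 1) else st.sumCnt).getD s 0 =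
          st.sumCnt.getD s 0 + (if (pvCell board q.1 q.2 = "B" ∨ pvCell board q.1 q.2 = "Q") ∧ q.1 + q.2 = s then 1 else 0) := by
        by_cases h : (pvCell board q.1 q.2 = "B" ∨ pvCell board q.1 q.2 = "Q")
        · rw [if_pos h, pvGetD_set _ _ _ _ _ (by omega)]
          by_cases hqs : q.1 + q.2 = s <;> simp [hqs, h]
        · rw [if_neg h]; simp [h]
      rw [hgd]
      by_cases h : (pvCell board q.1 q.2 = "B" ∨ pvCell board q.1 q.2 = "Q") <;> by_cases hqs : q.1 + q.2 = s <;>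
        simp [h, hqs] <;> push_cast <;> ring
    · intro s hs
      rw [s5 s hs, pvScanStep_diffCnt, List.countP_cons]
      have hgd : (if (pvCell board q.1 q.2 = "B" ∨ pvCell board q.1 q.2 = "Q") then
            st.diffCnt.set (n + q.1 - q.2) (st.diffCnt.getD (n + q.1 - q.2) 0 + 1) else st.diffCnt).getD s 0 =
          st.diffCnt.getD s 0 + (if (pvCell board q.1 q.2 = "B" ∨ pvCell board q.1 q.2 = "Q") ∧ n + q.1 - q.2 = s then 1 else 0) := by
        by_cases h : (pvCell board q.1 q.2 = "B" ∨ pvCell board q.1 q.2 = "Q")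
        · rw [if_pos h, pvGetD_set _ _ _ _ _ (by omega)]
          by_cases hqs : n + q.1 - q.2 = s <;> simp [hqs, h]
        · rw [if_neg h]; simp [h]
      rw [hgd]
      by_cases h : (pvCell board q.1 q.2 = "B" ∨ pvCell board q.1 q.2 = "Q") <;> by_cases hqs : n + q.1 - q.2 = s <;>
        simp [h, hqs] <;> push_cast <;> ring

lemma foldl_count {α : Type} (L : List α) (p : α → Bool) (t : Int) :
    L.foldl (fun t q => if p q then t + 1 else t) t = t + (L.countP p : Nat) := by
  induction L generalizing t with
  | nil => simp
  | cons q L ih =>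
    rw [List.foldl_cons, ih, List.countP_cons]
    by_cases h : p q <;> simp [h] <;> push_cast <;> ring

def pvSt0 (n : Nat) : PVState :=
  ⟨List.replicate n false, List.replicate n false,
   List.replicate (2 * n) (0 : Int), List.replicate (2 * n) (0 : Int)⟩

def pvPass1 (board : List (List String)) : PVState :=
  let n := board.length
  (List.range n).foldl
    (fun st i => (List.range n).foldl
      (fun (st : PVState) j =>
        let p := pvCell board i j
        let st := if p = "R" ∨ p = "Q" then
            { st with rowAtt := st.rowAtt.set i true, colAtt := st.colAtt.set j true }
          else st
        if p = "B" ∨ p = "Q" then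
          { st with sumCnt := st.sumCnt.set (i + j) (st.sumCnt.getD (i + j) 0 + 1),
                    diffCnt := st.diffCnt.set (n + i - j) (st.diffCnt.getD (n + i - j) 0 + 1) }
        else st) st)
    (pvSt0 n)

def pvPass2 (board : List (List String)) (st : PVState) : Int :=
  let n := board.length
  (List.range n).foldl
    (fun total i => (List.range n).foldl
      (fun (total : Int) j =>
        let p := pvCell board i j
        let selfd : Int := if p = "B" ∨ p = "Q" then 1 else 0
        if st.rowAtt.getD i false || st.colAtt.getD j false
            || decide (selfd < st.sumCnt.getD (i + j) 0)
            || decide (selfd < st.diffCnt.getD (n + i - j) 0) then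
          total + 1
        else total) total)
    (0 : Int)

lemma calcB_split (board : List (List String)) :
    calculate_attacked_squares_alt board = pvPass2 board (pvPass1 board) := rfl

lemma pass1_flat (board : List (List String)) :
    pvPass1 board = (pvPairs board.length).foldl (pvScanStep board board.length)
      (pvSt0 board.length) := by
  simp only [pvPass1]
  rw [foldl_foldl_product]
  rfl

def pvBCond (board : List (List String)) (st : PVState) (q : Nat × Nat) : Bool :=
  st.rowAtt.getD q.1 false || st.colAtt.getD q.2 false
    || decide ((if pvCell board q.1 q.2 = "B" ∨ pvCell board q.1 q.2 = "Q" then (1:Int) else 0) <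
          st.sumCnt.getD (q.1 + q.2) 0)
    || decide ((if pvCell board q.1 q.2 = "B" ∨ pvCell board q.1 q.2 = "Q" then (1:Int) else 0) <
          st.diffCnt.getD (board.length + q.1 - q.2) 0)

lemma pass2_flat (board : List (List String)) (st : PVState) :
    pvPass2 board st =
      ((pvPairs board.length).countP (pvBCond board st) : Nat) := by
  simp only [pvPass2]
  rw [foldl_foldl_product]
  have h := foldl_count (pvPairs board.length) (pvBCond board st) 0
  exact h.trans (by omega)

lemma mem_pvPairs {n : Nat} {q : Nat × Nat} : q ∈ pvPairs n ↔ q.1 < n ∧ q.2 < n := by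
  obtain ⟨a, b⟩ := q
  simp [pvPairs, List.pair_mem_product]

lemma count_gt_self (board : List (List String)) (n i j : Nat) (hi : i < n) (hj : j < n)
    (f : Nat × Nat → Nat) :
    ((if pvCell board i j = "B" ∨ pvCell board i j = "Q" then (1:Int) else 0) <
        (((pvPairs n).countP (fun q =>
          decide (pvCell board q.1 q.2 = "B" ∨ pvCell board q.1 q.2 = "Q") &&
          decide (f q = f (i, j)))) : Nat)) ↔
      ∃ q ∈ pvPairs n, q ≠ (i, j) ∧
        (pvCell board q.1 q.2 = "B" ∨ pvCell board q.1 q.2 = "Q") ∧ f q = f (i, j) := by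
  have hmem : (i, j) ∈ pvPairs n := mem_pvPairs.mpr ⟨hi, hj⟩
  have hnd : (pvPairs n).Nodup := List.Nodup.product List.nodup_range List.nodup_range
  set p : Nat × Nat → Bool := fun q =>
    decide (pvCell board q.1 q.2 = "B" ∨ pvCell board q.1 q.2 = "Q") &&
    decide (f q = f (i, j)) with hp
  have hcnt : (pvPairs n).countP p = ((pvPairs n).erase (i, j)).countP p +
      (if pvCell board i j = "B" ∨ pvCell board i j = "Q" then 1 else 0) := by
    rw [(List.perm_cons_erase hmem).countP_eq, List.countP_cons]
    congr 1
    by_cases h : pvCell board i j = "B" ∨ pvCell board i j = "Q" <;> simp [hp, h]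
  rw [hcnt]
  have hpos : (0 < ((pvPairs n).erase (i, j)).countP p) ↔
      ∃ q ∈ (pvPairs n).erase (i, j), p q := List.countP_pos_iff
  constructor
  · intro hlt
    have hk : 0 < ((pvPairs n).erase (i, j)).countP p := by
      by_cases h : pvCell board i j = "B" ∨ pvCell board i j = "Q"
      · simp only [if_pos h] at hlt; push_cast at hlt; omega
      · simp only [if_neg h] at hlt; push_cast at hlt; omega
    obtain ⟨q, hq, hpq⟩ := hpos.mp hk
    rw [List.Nodup.mem_erase_iff hnd] at hq
    refine ⟨q, hq.2, hq.1, ?_, ?_⟩ <;> simp [hp] at hpq <;> tauto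
  · rintro ⟨q, hq, hne, hbq, hf⟩
    have hk : 0 < ((pvPairs n).erase (i, j)).countP p :=
      hpos.mpr ⟨q, (List.Nodup.mem_erase_iff hnd).mpr ⟨hne, hq⟩, by simp [hp, hbq, hf]⟩
    by_cases h : pvCell board i j = "B" ∨ pvCell board i j = "Q"
    · simp only [if_pos h]; push_cast; omega
    · simp only [if_neg h]; push_cast; omega

lemma pvGetD_replicate {α : Type} (n i : Nat) (d : α) :
    (List.replicate n d).getD i d = d := by
  by_cases h : i < n
  · rw [List.getD_eq_getElem _ _ (by simpa using h), List.getElem_replicate]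
  · rw [List.getD_eq_default _ _ (by simpa using h)]

lemma calcB_eq_countP (board : List (List String)) :
    calculate_attacked_squares_alt board =
      (((pvPairs board.length).countP (pvAttackedB board) : Nat) : Int) := by
  rw [calcB_split, pass1_flat, pass2_flat]
  congr 1
  apply List.countP_congr
  rintro ⟨i, j⟩ hq
  obtain ⟨hi, hj⟩ := mem_pvPairs.mp hq
  have hb : ∀ q ∈ pvPairs board.length, q.1 < board.length ∧ q.2 < board.length := fun q hq => mem_pvPairs.mp hq
  have hsh0 : pvStShape board.length (pvSt0 board.length) := by
    refine ⟨?_, ?_, ?_, ?_⟩ <;> simp [pvSt0]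
  obtain ⟨_, hrow, hcol, hsum, hdiff⟩ := pass1_inv board board.length (pvPairs board.length) hb (pvSt0 board.length) hsh0
  have hrowv := hrow i hi
  have hcolv := hcol j hj
  have hsumv := hsum (i + j) (by omega)
  have hdiffv := hdiff (board.length + i - j) (by omega)
  simp only [pvBCond]
  rw [hrowv, hcolv, hsumv, hdiffv]
  simp only [pvSt0, pvGetD_replicate, zero_add, Bool.false_or]
  have hcs := count_gt_self board board.length i j hi hj (fun q => q.1 + q.2)
  have hcd := count_gt_self board board.length i j hi hj (fun q => board.length + q.1 - q.2)
  dsimp only at hcs hcd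
  simp only [Bool.or_eq_true, List.any_eq_true, Bool.and_eq_true, decide_eq_true_eq]
  rw [hcs, hcd, pvAttackedB_iff]
  show _ ↔ pvAttacked board i j
  unfold pvAttacked pvStraight pvDiagP
  constructor
  · rintro (((⟨q, hqm, hq1, hRQ⟩ | ⟨q, hqm, hq2, hRQ⟩) | ⟨q, hqm, hne, hBQ, hrel⟩) |
      ⟨q, hqm, hne, hBQ, hrel⟩)
    · obtain ⟨ha, hb'⟩ := mem_pvPairs.mp hqm
      rcases hRQ with h | h
      · exact Or.inl ⟨q.1, ha, q.2, hb', h, Or.inl hq1.symm⟩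
      · exact Or.inr (Or.inl ⟨q.1, ha, q.2, hb', h, Or.inl hq1.symm⟩)
    · obtain ⟨ha, hb'⟩ := mem_pvPairs.mp hqm
      rcases hRQ with h | h
      · exact Or.inl ⟨q.1, ha, q.2, hb', h, Or.inr hq2.symm⟩
      · exact Or.inr (Or.inl ⟨q.1, ha, q.2, hb', h, Or.inr hq2.symm⟩)
    · obtain ⟨ha, hb'⟩ := mem_pvPairs.mp hqm
      have hne' : ¬(q.1 = i ∧ q.2 = j) := by
        intro h; exact hne (Prod.ext h.1 h.2)
      rcases hBQ with h | h
      · exact Or.inr (Or.inr (Or.inl ⟨q.1, ha, q.2, hb', h, Or.inl hrel, hne'⟩))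
      · exact Or.inr (Or.inr (Or.inr ⟨q.1, ha, q.2, hb', h, Or.inl hrel, hne'⟩))
    · obtain ⟨ha, hb'⟩ := mem_pvPairs.mp hqm
      have hne' : ¬(q.1 = i ∧ q.2 = j) := by
        intro h; exact hne (Prod.ext h.1 h.2)
      have hrel' : q.1 + j = i + q.2 := by omega
      rcases hBQ with h | h
      · exact Or.inr (Or.inr (Or.inl ⟨q.1, ha, q.2, hb', h, Or.inr hrel', hne'⟩))
      · exact Or.inr (Or.inr (Or.inr ⟨q.1, ha, q.2, hb', h, Or.inr hrel', hne'⟩))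
  · rintro (⟨a, ha, b, hb', hc, hor⟩ | ⟨a, ha, b, hb', hc, hor⟩ |
      ⟨a, ha, b, hb', hc, hrel, hne⟩ | ⟨a, ha, b, hb', hc, hrel, hne⟩)
    · rcases hor with h | h
      · exact Or.inl (Or.inl (Or.inl ⟨(a, b), mem_pvPairs.mpr ⟨ha, hb'⟩, h.symm, Or.inl hc⟩))
      · exact Or.inl (Or.inl (Or.inr ⟨(a, b), mem_pvPairs.mpr ⟨ha, hb'⟩, h.symm, Or.inl hc⟩))
    · rcases hor with h | h
      · exact Or.inl (Or.inl (Or.inl ⟨(a, b), mem_pvPairs.mpr ⟨ha, hb'⟩, h.symm, Or.inr hc⟩))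
      · exact Or.inl (Or.inl (Or.inr ⟨(a, b), mem_pvPairs.mpr ⟨ha, hb'⟩, h.symm, Or.inr hc⟩))
    · have hne' : (a, b) ≠ (i, j) := by
        intro h; injection h with h1 h2; exact hne ⟨h1, h2⟩
      rcases hrel with hrel | hrel
      · exact Or.inl (Or.inr ⟨(a, b), mem_pvPairs.mpr ⟨ha, hb'⟩, hne', Or.inl hc, hrel⟩)
      · exact Or.inr ⟨(a, b), mem_pvPairs.mpr ⟨ha, hb'⟩, hne', Or.inl hc, by omega⟩
    · have hne' : (a, b) ≠ (i, j) := by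
        intro h; injection h with h1 h2; exact hne ⟨h1, h2⟩
      rcases hrel with hrel | hrel
      · exact Or.inl (Or.inr ⟨(a, b), mem_pvPairs.mpr ⟨ha, hb'⟩, hne', Or.inr hc, hrel⟩)
      · exact Or.inr ⟨(a, b), mem_pvPairs.mpr ⟨ha, hb'⟩, hne', Or.inr hc, by omega⟩

-- ===== VERDICT (by name: the statement is the Claim_ definition above) =====
theorem calculate_attacked_squares_spec : Claim_equal_calculate_attacked_squares := by
  intro board _ _
  unfold Spec_calculate_attacked_squares
  rw [calcA_eq_countP, calcB_eq_countP]
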